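-- pv_equiv track=rewrite | github.com/RideGreg/LeetCode | Python/minimum-flips-to-make-a-or-b-equal-to-c.py | minFlips_ming
-- ===== SOURCE A (Python) =====
-- def minFlips_ming(a: int, b: int, c: int) -> int:
--     a = bin(a)[:1:-1]
--     b = bin(b)[:1:-1]
--     c = bin(c)[:1:-1]
--     l = max(len(a), len(b), len(c))
--     ans = 0
--     for i in range(l):
--         av = int(a[i]) if i < len(a) else 0
--         bv = int(b[i]) if i < len(b) else 0
--         cv = int(c[i]) if i < len(c) else 0
--         if cv and av == 0 and bv == 0:
--             ans += 1
--         elif cv == 0: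
--             ans += int(av!=0)+int(bv!=0)
--     return ans
-- ===== SOURCE B (Python) =====
-- def minFlips_ming(a: int, b: int, c: int) -> int:
--     if a < 0 or b < 0 or c < 0:
--         raise ValueError("negative input")
--     # bits where c is 1 but a|b is 0 need one set-flip; set bits of a and b
--     # under a 0 bit of c each need one clear-flip
--     return (bin(c & ~(a | b)).count('1')
--             + bin(a & ~c).count('1')
--             + bin(b & ~c).count('1'))
-- ===== Notes on version B (the rewrite author's own statement) =====
-- stated objective: idiomatic
-- what changed: Replaces the per-bit loop over reversed binary strings with the branch-free closed form popcount(c & ~(a|b)) + popcount(a & ~c) + popcount(b & ~c).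
import Mathlib
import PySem

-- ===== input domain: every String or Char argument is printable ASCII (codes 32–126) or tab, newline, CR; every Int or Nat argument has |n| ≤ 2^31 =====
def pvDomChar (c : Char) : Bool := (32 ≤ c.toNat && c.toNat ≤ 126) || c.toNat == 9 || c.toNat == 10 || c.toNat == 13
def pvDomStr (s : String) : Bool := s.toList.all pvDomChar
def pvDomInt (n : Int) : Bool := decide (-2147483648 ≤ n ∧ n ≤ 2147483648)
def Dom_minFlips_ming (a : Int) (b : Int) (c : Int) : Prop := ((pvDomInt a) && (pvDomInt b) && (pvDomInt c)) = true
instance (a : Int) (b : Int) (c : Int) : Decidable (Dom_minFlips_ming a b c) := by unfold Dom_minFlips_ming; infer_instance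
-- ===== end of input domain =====

-- B replaces A's per-bit loop over reversed binary strings by the closed form
-- popcount(c & ~(a|b)) + popcount(a & ~c) + popcount(b & ~c) (objective: idiomatic bit manipulation).

-- ===== PORT A =====
-- bin(x)[:1:-1] for x > 0: least-significant-first digit list (exact on x ≥ 0;
-- on negative x the Python raises ValueError, excluded by Pre_).
def pvRevDigits (n : Nat) : List Int :=
  if h : n = 0 then [] else (n % 2 : Int) :: pvRevDigits (n / 2)
decreasing_by exact Nat.div_lt_self (Nat.pos_of_ne_zero h) one_lt_two

def pvBinRev (x : Int) : List Int :=
  if x = 0 then [0] else pvRevDigits x.natAbs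

def minFlips_ming (a : Int) (b : Int) (c : Int) : Int :=
  let la := pvBinRev a
  let lb := pvBinRev b
  let lc := pvBinRev c
  let l := max la.length (max lb.length lc.length)
  (List.range l).foldl (fun ans i =>
    let av := la.getD i 0          -- int(a[i]) if i < len(a) else 0
    let bv := lb.getD i 0
    let cv := lc.getD i 0
    if cv ≠ 0 ∧ av = 0 ∧ bv = 0 then ans + 1
    else if cv = 0 then ans + ((if av ≠ 0 then 1 else 0) + (if bv ≠ 0 then 1 else 0))
    else ans) 0

-- ===== PORT B =====
-- bin(x).count('1'): number of 1 digits of |x| (Python prints the magnitude after '-0b').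
def pvPopBits (n : Nat) : Nat :=
  if h : n = 0 then 0 else n % 2 + pvPopBits (n / 2)
decreasing_by exact Nat.div_lt_self (Nat.pos_of_ne_zero h) one_lt_two

def pvPopcount (x : Int) : Int := Int.ofNat (pvPopBits x.natAbs)

def minFlips_ming_alt (a : Int) (b : Int) (c : Int) : Int :=
  if a < 0 ∨ b < 0 ∨ c < 0 then 0   -- Source B raises ValueError here (outside Pre_); no value in Python
  else
    pvPopcount (Int.land c (Int.lnot (Int.lor a b)))
      + pvPopcount (Int.land a (Int.lnot c))
      + pvPopcount (Int.land b (Int.lnot c))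

-- ===== PRECONDITION & SPEC =====
-- Pre_ excludes negative arguments: there Python A raises ValueError
-- (bin(x)[:1:-1] ends with the 'b' of the '-0b' prefix, which reaches int()), and B raises too.
def Pre_minFlips_ming (a : Int) (b : Int) (c : Int) : Prop := 0 ≤ a ∧ 0 ≤ b ∧ 0 ≤ c
instance (a : Int) (b : Int) (c : Int) : Decidable (Pre_minFlips_ming a b c) := by
  unfold Pre_minFlips_ming; infer_instance

def pvWitness_minFlips_ming : Int × Int × Int := (5, 2, 6)

def Spec_minFlips_ming (a : Int) (b : Int) (c : Int) (out : Int) : Prop := out = minFlips_ming_alt a b c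
instance (a : Int) (b : Int) (c : Int) (out : Int) : Decidable (Spec_minFlips_ming a b c out) := by unfold Spec_minFlips_ming; infer_instance

-- ===== CLAIM (what is proved, stated in full; the proofs are below) =====
def Claim_equal_minFlips_ming : Prop := ∀ (a : Int) (b : Int) (c : Int), Dom_minFlips_ming a b c → Pre_minFlips_ming a b c → Spec_minFlips_ming a b c (minFlips_ming a b c)

-- ===== LEMMAS AND PROOFS =====

-- per-bit cost of making (av OR bv) equal cv, on digits
def pvStep (x y z : Nat) : Nat :=
  if z ≠ 0 ∧ x = 0 ∧ y = 0 then 1 else if z = 0 then x + y else 0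

-- the common reference function: total flips, by simultaneous binary recursion
def pvF (a b c : Nat) : Nat :=
  if _h : a = 0 ∧ b = 0 ∧ c = 0 then 0
  else pvStep (a % 2) (b % 2) (c % 2) + pvF (a / 2) (b / 2) (c / 2)
termination_by a + b + c
decreasing_by omega

lemma pvF_unfold (a b c : Nat) :
    pvF a b c = pvStep (a % 2) (b % 2) (c % 2) + pvF (a / 2) (b / 2) (c / 2) := by
  rw [pvF]
  split
  · rename_i h
    obtain ⟨ha, hb, hc⟩ := h
    subst ha; subst hb; subst hc
    rw [pvF]
    simp [pvStep]
  · rfl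

lemma getD_pvRevDigits (n : Nat) : ∀ i : Nat, (pvRevDigits n).getD i 0 = ((n / 2 ^ i % 2 : Nat) : Int) := by
  induction n using Nat.strong_induction_on with
  | _ n ih =>
    intro i
    rw [pvRevDigits]
    split
    · rename_i h; subst h; simp
    · rename_i h
      cases i with
      | zero => simp
      | succ i =>
        have := ih (n / 2) (Nat.div_lt_self (Nat.pos_of_ne_zero h) one_lt_two) i
        simp only [List.getD_cons_succ, this]
        rw [Nat.div_div_eq_div_mul, ← pow_succ']

lemma getD_pvBinRev (n : Nat) (i : Nat) :
    (pvBinRev (n : Int)).getD i 0 = ((n / 2 ^ i % 2 : Nat) : Int) := by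
  unfold pvBinRev
  split
  · rename_i h
    have h0 : n = 0 := by exact_mod_cast h
    subst h0
    cases i <;> simp
  · rw [Int.natAbs_natCast, getD_pvRevDigits]

lemma lt_two_pow_len_pvRevDigits (n : Nat) : n ≠ 0 → n < 2 ^ (pvRevDigits n).length := by
  induction n using Nat.strong_induction_on with
  | _ n ih =>
    intro h
    rw [pvRevDigits]
    simp only [h, dif_neg, not_false_iff, List.length_cons]
    by_cases h2 : n / 2 = 0
    · rw [pvRevDigits]
      simp only [h2, dif_pos, List.length_nil]
      omega
    · have := ih (n / 2) (Nat.div_lt_self (Nat.pos_of_ne_zero h) one_lt_two) h2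
      rw [pow_succ]
      omega

lemma lt_two_pow_len_pvBinRev (n : Nat) : n < 2 ^ (pvBinRev (n : Int)).length := by
  unfold pvBinRev
  split
  · rename_i h
    have h0 : n = 0 := by exact_mod_cast h
    subst h0; simp
  · rename_i h
    exact lt_two_pow_len_pvRevDigits n (fun h0 => h (by rw [h0]; rfl))

lemma foldl_range_add (t : Nat → Int) : ∀ (l : Nat) (s : Int),
    (List.range l).foldl (fun ans i => ans + t i) s = s + ∑ i ∈ Finset.range l, t i := by
  intro l
  induction l with
  | zero => intro s; simp
  | succ l ih =>
    intro s
    rw [List.range_succ, List.foldl_append, ih, Finset.sum_range_succ]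
    simp [add_assoc]

lemma sum_step_eq_pvF : ∀ (l a b c : Nat), a < 2 ^ l → b < 2 ^ l → c < 2 ^ l →
    ∑ i ∈ Finset.range l, pvStep (a / 2 ^ i % 2) (b / 2 ^ i % 2) (c / 2 ^ i % 2) = pvF a b c := by
  intro l
  induction l with
  | zero =>
    intro a b c ha hb hc
    simp at ha hb hc
    subst ha; subst hb; subst hc
    rw [pvF]; simp
  | succ l ih =>
    intro a b c ha hb hc
    rw [Finset.sum_range_succ']
    have hstep : ∀ n i : Nat, n / 2 ^ (i + 1) % 2 = (n / 2) / 2 ^ i % 2 := by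
      intro n i
      rw [Nat.div_div_eq_div_mul, ← pow_succ']
    simp only [hstep, pow_zero, Nat.div_one]
    rw [pow_succ] at ha hb hc
    rw [ih (a / 2) (b / 2) (c / 2) (by omega) (by omega) (by omega)]
    rw [pvF_unfold a b c, add_comm]

lemma portA_eq_pvF (na nb nc : Nat) :
    minFlips_ming (na : Int) (nb : Int) (nc : Int) = (pvF na nb nc : Int) := by
  unfold minFlips_ming
  simp only []
  have hbody : (fun (ans : Int) (i : Nat) =>
      let av := (pvBinRev (na : Int)).getD i 0
      let bv := (pvBinRev (nb : Int)).getD i 0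
      let cv := (pvBinRev (nc : Int)).getD i 0
      if cv ≠ 0 ∧ av = 0 ∧ bv = 0 then ans + 1
      else if cv = 0 then ans + ((if av ≠ 0 then 1 else 0) + (if bv ≠ 0 then 1 else 0))
      else ans)
      = fun (ans : Int) (i : Nat) =>
        ans + ((pvStep (na / 2 ^ i % 2) (nb / 2 ^ i % 2) (nc / 2 ^ i % 2) : Nat) : Int) := by
    funext ans i
    simp only [getD_pvBinRev, pvStep]
    have hx : na / 2 ^ i % 2 < 2 := Nat.mod_lt _ (by norm_num)
    have hy : nb / 2 ^ i % 2 < 2 := Nat.mod_lt _ (by norm_num)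
    have hz : nc / 2 ^ i % 2 < 2 := Nat.mod_lt _ (by norm_num)
    generalize (na / 2 ^ i % 2) = x at hx ⊢
    generalize (nb / 2 ^ i % 2) = y at hy ⊢
    generalize (nc / 2 ^ i % 2) = z at hz ⊢
    split_ifs <;> push_cast <;> omega
  rw [hbody, foldl_range_add, zero_add]
  rw [← Nat.cast_sum]
  congr 1
  apply sum_step_eq_pvF
  · exact lt_of_lt_of_le (lt_two_pow_len_pvBinRev na)
      (Nat.pow_le_pow_right (by norm_num) (le_max_left _ _))
  · exact lt_of_lt_of_le (lt_two_pow_len_pvBinRev nb)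
      (Nat.pow_le_pow_right (by norm_num) (le_trans (le_max_left _ _) (le_max_right _ _)))
  · exact lt_of_lt_of_le (lt_two_pow_len_pvBinRev nc)
      (Nat.pow_le_pow_right (by norm_num) (le_trans (le_max_right _ _) (le_max_right _ _)))

lemma ldiff_div_two (m n : Nat) : Nat.ldiff m n / 2 = Nat.ldiff (m / 2) (n / 2) := by
  apply Nat.eq_of_testBit_eq
  intro i
  rw [Nat.testBit_div_two, Nat.testBit_ldiff, Nat.testBit_ldiff, Nat.testBit_div_two,
    Nat.testBit_div_two]

lemma ldiff_mod_two (m n : Nat) :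
    Nat.ldiff m n % 2 = if m % 2 = 1 ∧ n % 2 = 0 then 1 else 0 := by
  have h := Nat.testBit_ldiff m n 0
  simp only [Nat.testBit_zero] at h
  have h' : (Nat.ldiff m n % 2 = 1) ↔ (m % 2 = 1 ∧ ¬ n % 2 = 1) := by
    constructor
    · intro hx
      have := h.symm.trans (by simpa using hx : (decide (Nat.ldiff m n % 2 = 1)) = true)
      simp at this ⊢
      omega
    · intro hx
      have : (decide (m % 2 = 1) && !decide (n % 2 = 1)) = true := by
        simp; omega
      have := h.trans this
      simpa using this
  split_ifs <;> omega

lemma or_div_two (m n : Nat) : (m ||| n) / 2 = (m / 2) ||| (n / 2) := by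
  apply Nat.eq_of_testBit_eq
  intro i
  rw [Nat.testBit_div_two, Nat.testBit_or, Nat.testBit_or, Nat.testBit_div_two,
    Nat.testBit_div_two]

lemma or_mod_two (m n : Nat) :
    (m ||| n) % 2 = if m % 2 = 1 ∨ n % 2 = 1 then 1 else 0 := by
  have h := Nat.testBit_or m n 0
  simp only [Nat.testBit_zero] at h
  have h' : ((m ||| n) % 2 = 1) ↔ (m % 2 = 1 ∨ n % 2 = 1) := by
    constructor
    · intro hx
      have := h.symm.trans (by simpa using hx : (decide ((m ||| n) % 2 = 1)) = true)
      simpa using this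
    · intro hx
      have : (decide (m % 2 = 1) || decide (n % 2 = 1)) = true := by
        simpa using hx
      have := h.trans this
      simpa using this
  split_ifs <;> omega

lemma pvPopBits_unfold (n : Nat) : pvPopBits n = n % 2 + pvPopBits (n / 2) := by
  rw [pvPopBits]
  split
  · rename_i h; subst h; rw [pvPopBits]; simp
  · rfl

lemma ldiff_zero_zero : Nat.ldiff 0 0 = 0 := by
  apply Nat.eq_of_testBit_eq
  intro i
  simp [Nat.testBit_ldiff]

lemma portB_nat : ∀ (m a b c : Nat), a + b + c = m →
    pvPopBits (Nat.ldiff c (a ||| b)) + pvPopBits (Nat.ldiff a c) + pvPopBits (Nat.ldiff b c)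
      = pvF a b c := by
  intro m
  induction m using Nat.strong_induction_on with
  | _ m ih =>
    intro a b c hm
    by_cases h0 : a = 0 ∧ b = 0 ∧ c = 0
    · obtain ⟨ha, hb, hc⟩ := h0
      subst ha; subst hb; subst hc
      rw [pvF]
      simp only [Nat.zero_or, ldiff_zero_zero]
      rw [pvPopBits]
      simp
    · rw [pvPopBits_unfold (Nat.ldiff c (a ||| b)), pvPopBits_unfold (Nat.ldiff a c),
        pvPopBits_unfold (Nat.ldiff b c)]
      rw [ldiff_div_two, ldiff_div_two, ldiff_div_two, or_div_two]
      have hrec := ih (a / 2 + b / 2 + c / 2) (by omega) (a / 2) (b / 2) (c / 2) rfl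
      rw [pvF_unfold a b c]
      have hmods : Nat.ldiff c (a ||| b) % 2 + Nat.ldiff a c % 2 + Nat.ldiff b c % 2
          = pvStep (a % 2) (b % 2) (c % 2) := by
        rw [ldiff_mod_two, ldiff_mod_two, ldiff_mod_two, or_mod_two, pvStep]
        rcases Nat.mod_two_eq_zero_or_one a with ha | ha <;>
        rcases Nat.mod_two_eq_zero_or_one b with hb | hb <;>
        rcases Nat.mod_two_eq_zero_or_one c with hc | hc <;>
        simp [ha, hb, hc]
      omega

lemma portB_eq_pvF (na nb nc : Nat) :
    minFlips_ming_alt (na : Int) (nb : Int) (nc : Int) = (pvF na nb nc : Int) := by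
  unfold minFlips_ming_alt pvPopcount
  rw [if_neg (by omega)]
  simp only [Int.lor, Int.lnot, Int.land, Int.ofNat_eq_natCast, Int.natAbs_natCast]
  have h := portB_nat (na + nb + nc) na nb nc rfl
  omega

-- ===== VERDICT (by name: the statement is the Claim_ definition above) =====
theorem minFlips_ming_spec : Claim_equal_minFlips_ming := by
  intro a b c _ hpre
  obtain ⟨ha, hb, hc⟩ := hpre
  obtain ⟨na, rfl⟩ := Int.eq_ofNat_of_zero_le ha
  obtain ⟨nb, rfl⟩ := Int.eq_ofNat_of_zero_le hb
  obtain ⟨nc, rfl⟩ := Int.eq_ofNat_of_zero_le hc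
  unfold Spec_minFlips_ming
  rw [portB_eq_pvF]
  exact portA_eq_pvF na nb nc
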